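-- pv_equiv track=rewrite | github.com/jinsuseo91/codetree-TILs | 250708/1이 되는 순간까지/until-the-moment-I-reach-one.py | until_1
-- ===== SOURCE A (Python) =====
-- def until_1(n):
--     if n == 1:
--         return 0
--     if n % 2 == 0:
--         n //= 2
--     else:
--         n //= 3
--     return until_1(n) + 1
-- ===== SOURCE B (Python) =====
-- def _step(n):
--     return n // 2 if n % 2 == 0 else n // 3
--
-- def until_1(n):
--     trajectory = []
--     while n != 1:
--         trajectory.append(n)
--         n = _step(n)
--     return len(trajectory)
-- ===== Notes on version B (the rewrite author's own statement) =====
-- stated objective: alternative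
-- what changed: B iteratively records the trajectory of intermediate values in a list (via a named step helper) and returns its length, instead of A's recursive +1 accumulation.
import Mathlib
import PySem

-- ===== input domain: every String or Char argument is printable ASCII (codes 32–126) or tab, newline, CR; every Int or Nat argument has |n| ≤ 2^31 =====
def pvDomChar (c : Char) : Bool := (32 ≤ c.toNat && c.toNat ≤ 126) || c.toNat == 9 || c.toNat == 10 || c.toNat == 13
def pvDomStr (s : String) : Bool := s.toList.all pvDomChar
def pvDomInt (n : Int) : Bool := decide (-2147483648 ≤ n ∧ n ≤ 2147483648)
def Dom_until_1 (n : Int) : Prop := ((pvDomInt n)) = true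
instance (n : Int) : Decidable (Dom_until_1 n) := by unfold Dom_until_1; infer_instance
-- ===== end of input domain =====

-- B iteratively records the trajectory of intermediate values in a list and returns
-- its length, instead of A's recursive +1 accumulation (alternative decomposition).

-- ===== PORT A =====
-- A's unbounded recursion, made total with a fuel parameter; fuel = n.toNat is
-- enough for every n ≥ 1 (each step strictly decreases n while it stays ≥ 1).
def until_1_go (fuel : Nat) (n : Int) : Int :=
  match fuel with
  | 0 => 0
  | fuel + 1 =>
    if n = 1 then 0
    else
      (until_1_go fuel (if PySem.Int.mod n 2 = 0 then PySem.Int.floordiv n 2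
                        else PySem.Int.floordiv n 3)) + 1

def until_1 (n : Int) : Int := until_1_go n.toNat n

-- ===== PORT B =====
-- Source B's helper _step.
def until_1_step (n : Int) : Int :=
  if PySem.Int.mod n 2 = 0 then PySem.Int.floordiv n 2 else PySem.Int.floordiv n 3

-- Source B's while-loop building the trajectory list, as a fuel loop.
def until_1_traj (fuel : Nat) (n : Int) (trajectory : List Int) : List Int :=
  match fuel with
  | 0 => trajectory
  | fuel + 1 =>
    if n = 1 then trajectory
    else until_1_traj fuel (until_1_step n) (trajectory ++ [n])

def until_1_alt (n : Int) : Int := ((until_1_traj n.toNat n []).length : Int)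

-- ===== PRECONDITION & SPEC =====
-- A raises RecursionError (and B's loop does not terminate) for n ≤ 0, which never reaches 1.
def Pre_until_1 (n : Int) : Prop := 1 ≤ n
instance (n : Int) : Decidable (Pre_until_1 n) := by unfold Pre_until_1; infer_instance
def pvWitness_until_1 : Int := (12)

def Spec_until_1 (n : Int) (out : Int) : Prop := out = until_1_alt n
instance (n : Int) (out : Int) : Decidable (Spec_until_1 n out) := by unfold Spec_until_1; infer_instance

-- ===== CLAIM (what is proved, stated in full; the proofs are below) =====
def Claim_equal_until_1 : Prop := ∀ (n : Int), Dom_until_1 n → Pre_until_1 n → Spec_until_1 n (until_1 n)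

-- ===== LEMMAS AND PROOFS =====
-- The trajectory loop's output length is A's recursion plus the accumulator's length.
theorem until_1_traj_length (fuel : Nat) : ∀ (n : Int) (acc : List Int),
    ((until_1_traj fuel n acc).length : Int) = until_1_go fuel n + acc.length := by
  induction fuel with
  | zero => intro n acc; simp [until_1_traj, until_1_go]
  | succ fuel ih =>
    intro n acc
    simp only [until_1_traj, until_1_go, until_1_step]
    split
    · simp
    · rw [ih]; simp; ring

-- ===== VERDICT (by name: the statement is the Claim_ definition above) =====
theorem until_1_spec : Claim_equal_until_1 := by
  intro n _ _
  unfold Spec_until_1 until_1 until_1_alt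
  rw [until_1_traj_length]
  simp
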